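-- pv_equiv track=rewrite | github.com/ABHINAV112/DPAdventures | snake_sequence/main.py | snake_sequence
-- ===== SOURCE A (Python) =====
-- def snake_sequence(array):
--     dp = [[0 for i in array[0]] for j in array]
--     maxi = 0
--     for i in range(len(array)):
--         for j in range(len(array[i])):
--             up = 0
--             left = 0
--             if(i-1>=0 and abs(array[i-1][j]-array[i][j])==1):
--                 up = dp[i-1][j]
--             if(j-1>=0 and abs(array[i][j-1]-array[i][j])==1):
--                 left = dp[i][j-1]
--             dp[i][j] = max(up, left) + 1
--             if(dp[i][j]>maxi):
--                 maxi =dp[i][j]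
--     return maxi
-- ===== SOURCE B (Python) =====
-- def snake_sequence(array):
--     memo = {}
--
--     def best(i, j):
--         if (i, j) in memo:
--             return memo[(i, j)]
--         v = array[i][j]
--         up = best(i - 1, j) if i > 0 and abs(array[i - 1][j] - v) == 1 else 0
--         left = best(i, j - 1) if j > 0 and abs(array[i][j - 1] - v) == 1 else 0
--         r = 1 + max(up, left)
--         memo[(i, j)] = r
--         return r
--
--     m = 0
--     for i in range(len(array)):
--         for j in range(len(array[i])):
--             m = max(m, best(i, j))
--     return m
-- ===== Notes on version B (the rewrite author's own statement) =====
-- stated objective: alternative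
-- what changed: Replaces A's forward table sweep that threads a mutable dp grid and running maximum through nested loops with a top-down memoized recursion best(i,j) over the two neighbours, maximized over all cells.
import Mathlib
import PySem

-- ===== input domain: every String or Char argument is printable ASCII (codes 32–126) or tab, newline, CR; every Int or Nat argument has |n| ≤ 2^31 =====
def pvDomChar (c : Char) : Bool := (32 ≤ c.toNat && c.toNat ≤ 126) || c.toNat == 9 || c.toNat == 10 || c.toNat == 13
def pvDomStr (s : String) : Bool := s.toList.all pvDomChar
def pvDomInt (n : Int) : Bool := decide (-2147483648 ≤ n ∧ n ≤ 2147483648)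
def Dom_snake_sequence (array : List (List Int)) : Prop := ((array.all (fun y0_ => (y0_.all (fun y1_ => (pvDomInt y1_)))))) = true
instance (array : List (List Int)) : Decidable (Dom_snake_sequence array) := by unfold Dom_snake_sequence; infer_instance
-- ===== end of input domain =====

-- B is the same DP recurrence decomposed as top-down memoized recursion over neighbours instead of A's forward table sweep (objective: alternative decomposition, same cost).

-- ===== PORT A =====
-- one body of A's inner double loop: state is (dp, maxi)
def snakeStepInner (array : List (List Int)) (i : Nat) (st : List (List Int) × Int) (j : Nat) :
    List (List Int) × Int :=
  let dp := st.1
  let maxi := st.2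
  let up : Int :=
    if 0 < i ∧ ((array.getD (i - 1) []).getD j 0 - (array.getD i []).getD j 0).natAbs = 1 then
      (dp.getD (i - 1) []).getD j 0
    else 0
  let left : Int :=
    if 0 < j ∧ ((array.getD i []).getD (j - 1) 0 - (array.getD i []).getD j 0).natAbs = 1 then
      (dp.getD i []).getD (j - 1) 0
    else 0
  let v : Int := max up left + 1
  (dp.set i ((dp.getD i []).set j v), if v > maxi then v else maxi)

def snake_sequence (array : List (List Int)) : Int :=
  ((List.range array.length).foldl
      (fun st i => (List.range ((array.getD i []).length)).foldl (snakeStepInner array i) st)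
      (array.map (fun _ => (array.getD 0 []).map (fun _ => (0 : Int))), 0)).2

-- ===== PORT B =====
-- best i j = length of the longest snake ending at cell (i,j) (Source B's `best`, memo dropped)
def snakeBest (array : List (List Int)) (i j : Nat) : Int :=
  let v := (array.getD i []).getD j 0
  let up : Int :=
    if h : 0 < i ∧ ((array.getD (i - 1) []).getD j 0 - v).natAbs = 1 then
      snakeBest array (i - 1) j
    else 0
  let left : Int :=
    if h : 0 < j ∧ ((array.getD i []).getD (j - 1) 0 - v).natAbs = 1 then
      snakeBest array i (j - 1)
    else 0
  1 + max up left
termination_by (i, j)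
decreasing_by
  · exact Prod.Lex.left _ _ (by omega)
  · exact Prod.Lex.right _ (by omega)

def snake_sequence_alt (array : List (List Int)) : Int :=
  (List.range array.length).foldl
    (fun m i =>
      (List.range ((array.getD i []).length)).foldl (fun m j => max m (snakeBest array i j)) m)
    0

-- ===== PRECONDITION & SPEC =====
-- Pre_ excludes exactly the ragged grids on which A raises IndexError (a row longer than the
-- row above it makes A read array[i-1][j] or write dp[i][j] out of range): row widths must be
-- non-increasing from top to bottom. A returns normally on every such grid (including []).
def Pre_snake_sequence (array : List (List Int)) : Prop :=
  List.IsChain (fun r s : List Int => s.length ≤ r.length) array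

instance (array : List (List Int)) : Decidable (Pre_snake_sequence array) := by
  unfold Pre_snake_sequence; infer_instance

def pvWitness_snake_sequence : List (List Int) := [[5, 6, 7], [4, 5], [3]]

def Spec_snake_sequence (array : List (List Int)) (out : Int) : Prop := out = snake_sequence_alt array
instance (array : List (List Int)) (out : Int) : Decidable (Spec_snake_sequence array out) := by unfold Spec_snake_sequence; infer_instance

-- ===== CLAIM (what is proved, stated in full; the proofs are below) =====
def Claim_equal_snake_sequence : Prop := ∀ (array : List (List Int)), Dom_snake_sequence array → Pre_snake_sequence array → Spec_snake_sequence array (snake_sequence array)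

-- ===== LEMMAS AND PROOFS =====

-- table invariant: before processing cell (i,j) in row-major order, dp holds snakeBest at
-- every already-processed cell and 0 elsewhere
def DpOk (array : List (List Int)) (i j : Nat) (dp : List (List Int)) : Prop :=
  dp.length = array.length ∧
  (∀ k, k < array.length → (dp.getD k []).length = (array.getD 0 []).length) ∧
  (∀ p q : Nat, (dp.getD p []).getD q 0 =
     if p < array.length ∧ q < (array.getD p []).length ∧ (p < i ∨ (p = i ∧ q < j))
     then snakeBest array p q else 0)

theorem getD_eq_getElem' {α : Type} (l : List α) (d : α) (i : Nat) (h : i < l.length) :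
    l.getD i d = l[i] := by
  simp [List.getD_eq_getElem?_getD, List.getElem?_eq_getElem h]

theorem width_mono (array : List (List Int)) (h : Pre_snake_sequence array)
    {a b : Nat} (hab : a ≤ b) (hb : b < array.length) :
    (array.getD b []).length ≤ (array.getD a []).length := by
  unfold Pre_snake_sequence at h
  rw [List.isChain_iff_getElem] at h
  obtain ⟨k, rfl⟩ := Nat.exists_eq_add_of_le hab
  induction k with
  | zero => simp
  | succ n ih =>
    have h1 : a + n + 1 < array.length := by omega
    have h2 : a + n < array.length := by omega
    have step := h (a + n) (by omega)
    show (array.getD (a + n + 1) []).length ≤ (array.getD a []).length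
    rw [getD_eq_getElem' array [] (a + n + 1) h1, getD_eq_getElem' array [] a (by omega)]
    calc array[a + n + 1].length ≤ array[a + n].length := step
      _ ≤ (array.getD a []).length := by
          rw [getD_eq_getElem' array [] (a + n) h2] at ih; exact ih (by omega) h2
      _ = array[a].length := by rw [getD_eq_getElem' array [] a (by omega)]

theorem step_ok (array : List (List Int)) (hpre : Pre_snake_sequence array)
    {i j : Nat} {dp : List (List Int)} {maxi : Int}
    (hi : i < array.length) (hj : j < (array.getD i []).length)
    (h : DpOk array i j dp) :
    DpOk array i (j + 1) (snakeStepInner array i (dp, maxi) j).1 ∧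
      (snakeStepInner array i (dp, maxi) j).2 = max maxi (snakeBest array i j) := by
  obtain ⟨h1, h2, h3⟩ := h
  have hi' : i < dp.length := by rw [h1]; exact hi
  have hW0 : (array.getD i []).length ≤ (array.getD 0 []).length :=
    width_mono array hpre (Nat.zero_le i) hi
  have hrowlen : (dp.getD i []).length = (array.getD 0 []).length := h2 i hi
  have hjrow : j < (dp.getD i []).length := by omega
  -- the two guard values agree with snakeBest's recursive calls
  have hup : (if 0 < i ∧ ((array.getD (i - 1) []).getD j 0 - (array.getD i []).getD j 0).natAbs = 1
        then (dp.getD (i - 1) []).getD j 0 else 0)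
      = (if _ : 0 < i ∧ ((array.getD (i - 1) []).getD j 0 - (array.getD i []).getD j 0).natAbs = 1
        then snakeBest array (i - 1) j else 0) := by
    by_cases hc : 0 < i ∧ ((array.getD (i - 1) []).getD j 0 - (array.getD i []).getD j 0).natAbs = 1
    · rw [if_pos hc, dif_pos hc, h3 (i - 1) j, if_pos]
      refine ⟨by omega, ?_, Or.inl (by omega)⟩
      have := width_mono array hpre (show i - 1 ≤ i by omega) hi
      omega
    · rw [if_neg hc, dif_neg hc]
  have hleft : (if 0 < j ∧ ((array.getD i []).getD (j - 1) 0 - (array.getD i []).getD j 0).natAbs = 1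
        then (dp.getD i []).getD (j - 1) 0 else 0)
      = (if _ : 0 < j ∧ ((array.getD i []).getD (j - 1) 0 - (array.getD i []).getD j 0).natAbs = 1
        then snakeBest array i (j - 1) else 0) := by
    by_cases hc : 0 < j ∧ ((array.getD i []).getD (j - 1) 0 - (array.getD i []).getD j 0).natAbs = 1
    · rw [if_pos hc, dif_pos hc, h3 i (j - 1), if_pos]
      exact ⟨hi, by omega, Or.inr ⟨rfl, by omega⟩⟩
    · rw [if_neg hc, dif_neg hc]
  have hbest : snakeBest array i j =
      max (if 0 < i ∧ ((array.getD (i - 1) []).getD j 0 - (array.getD i []).getD j 0).natAbs = 1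
        then (dp.getD (i - 1) []).getD j 0 else 0)
        (if 0 < j ∧ ((array.getD i []).getD (j - 1) 0 - (array.getD i []).getD j 0).natAbs = 1
        then (dp.getD i []).getD (j - 1) 0 else 0) + 1 := by
    rw [hup, hleft, snakeBest]
    omega
  -- characterize the updated table
  have hset : ∀ p : Nat, ((dp.set i ((dp.getD i []).set j (snakeBest array i j))).getD p []) =
      if p = i then (dp.getD i []).set j (snakeBest array i j) else dp.getD p [] := by
    intro p
    by_cases hpi : p = i
    · subst hpi
      rw [if_pos rfl, getD_eq_getElem' _ _ p (by rw [List.length_set]; exact hi')]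
      simp
    · rw [if_neg hpi, List.getD_eq_getElem?_getD, List.getElem?_set_ne (by omega),
        ← List.getD_eq_getElem?_getD]
  have hsetrow : ∀ q : Nat, (((dp.getD i []).set j (snakeBest array i j)).getD q 0) =
      if q = j then snakeBest array i j else (dp.getD i []).getD q 0 := by
    intro q
    by_cases hqj : q = j
    · subst hqj
      rw [if_pos rfl, getD_eq_getElem' _ _ q (by rw [List.length_set]; exact hjrow)]
      simp [List.getElem_set_self]
    · rw [if_neg hqj, List.getD_eq_getElem?_getD, List.getElem?_set_ne (by omega),
        ← List.getD_eq_getElem?_getD]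
  constructor
  · -- the invariant advances
    simp only [snakeStepInner, ← hbest]
    refine ⟨by rw [List.length_set]; exact h1, ?_, ?_⟩
    · intro k hk
      rw [hset k]
      by_cases hki : k = i
      · rw [if_pos hki, List.length_set]; exact hrowlen
      · rw [if_neg hki]; exact h2 k hk
    · intro p q
      rw [hset p]
      by_cases hpi : p = i
      · subst hpi
        rw [if_pos rfl, hsetrow q]
        by_cases hqj : q = j
        · subst hqj
          rw [if_pos rfl, if_pos ⟨hi, hj, Or.inr ⟨rfl, by omega⟩⟩]
        · rw [if_neg hqj, h3 p q]
          refine if_congr ⟨?_, ?_⟩ rfl rfl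
          · rintro ⟨ha, hb, hc⟩
            exact ⟨ha, hb, by omega⟩
          · rintro ⟨ha, hb, hc⟩
            exact ⟨ha, hb, by omega⟩
      · rw [if_neg hpi, h3 p q]
        refine if_congr ⟨?_, ?_⟩ rfl rfl
        · rintro ⟨ha, hb, hc⟩
          exact ⟨ha, hb, by omega⟩
        · rintro ⟨ha, hb, hc⟩
          exact ⟨ha, hb, by omega⟩
  · -- maxi update is a max
    simp only [snakeStepInner, ← hbest]
    rw [max_def]
    split_ifs <;> omega

theorem dpok_shift (array : List (List Int)) {i : Nat} {dp : List (List Int)}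
    (h : DpOk array i ((array.getD i []).length) dp) : DpOk array (i + 1) 0 dp := by
  obtain ⟨h1, h2, h3⟩ := h
  refine ⟨h1, h2, ?_⟩
  intro p q
  rw [h3 p q]
  refine if_congr ?_ rfl rfl
  constructor
  · rintro ⟨hp, hq, hc⟩
    refine ⟨hp, hq, ?_⟩
    rcases hc with hlt | ⟨rfl, _⟩
    · left; omega
    · left; omega
  · rintro ⟨hp, hq, hc⟩
    refine ⟨hp, hq, ?_⟩
    rcases hc with hlt | ⟨_, h0⟩
    · rcases Nat.lt_or_ge p i with hpi | hpi
      · left; exact hpi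
      · right; refine ⟨by omega, ?_⟩; rw [show i = p by omega]; exact hq
    · omega

theorem inner_loop (array : List (List Int)) (hpre : Pre_snake_sequence array)
    {i : Nat} (hi : i < array.length) :
    ∀ (k j : Nat) (dp : List (List Int)) (maxi : Int),
      j + k = (array.getD i []).length → DpOk array i j dp →
      DpOk array i (j + k) ((List.range' j k).foldl (snakeStepInner array i) (dp, maxi)).1 ∧
      ((List.range' j k).foldl (snakeStepInner array i) (dp, maxi)).2 =
        (List.range' j k).foldl (fun m j' => max m (snakeBest array i j')) maxi := by
  intro k
  induction k with
  | zero => intro j dp maxi _ hdp; simpa using hdp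
  | succ n ih =>
    intro j dp maxi hlen hdp
    have hj : j < (array.getD i []).length := by omega
    obtain ⟨hdp', hmax'⟩ := step_ok array hpre (maxi := maxi) hi hj hdp
    have hrec := ih (j + 1) (snakeStepInner array i (dp, maxi) j).1
      (snakeStepInner array i (dp, maxi) j).2 (by omega) hdp'
    rw [Prod.mk.eta] at hrec
    rw [List.range'_succ, List.foldl_cons, List.foldl_cons]
    constructor
    · rw [show j + (n + 1) = (j + 1) + n by omega]
      exact hrec.1
    · rw [hrec.2, hmax']

theorem outer_loop (array : List (List Int)) (hpre : Pre_snake_sequence array) :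
    ∀ (k i : Nat) (dp : List (List Int)) (maxi : Int),
      i + k = array.length → DpOk array i 0 dp →
      ((List.range' i k).foldl
          (fun st i' => (List.range ((array.getD i' []).length)).foldl (snakeStepInner array i') st)
          (dp, maxi)).2 =
      (List.range' i k).foldl
          (fun m i' => (List.range ((array.getD i' []).length)).foldl
              (fun m j => max m (snakeBest array i' j)) m) maxi := by
  intro k
  induction k with
  | zero => intro i dp maxi _ _; rfl
  | succ n ih =>
    intro i dp maxi hlen hdp
    have hi : i < array.length := by omega
    have hinner := inner_loop array hpre hi ((array.getD i []).length) 0 dp maxi (by omega) hdp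
    have hshift : DpOk array (i + 1) 0
        ((List.range' 0 ((array.getD i []).length)).foldl (snakeStepInner array i) (dp, maxi)).1 := by
      apply dpok_shift
      rw [Nat.zero_add] at hinner
      exact hinner.1
    have hrec := ih (i + 1)
      ((List.range' 0 ((array.getD i []).length)).foldl (snakeStepInner array i) (dp, maxi)).1
      ((List.range' 0 ((array.getD i []).length)).foldl (snakeStepInner array i) (dp, maxi)).2
      (by omega) hshift
    rw [Prod.mk.eta] at hrec
    rw [List.range'_succ, List.foldl_cons, List.foldl_cons, List.range_eq_range']
    rw [hrec, hinner.2]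

theorem dpok_init (array : List (List Int)) :
    DpOk array 0 0 (array.map (fun _ => (array.getD 0 []).map (fun _ => (0 : Int)))) := by
  refine ⟨by simp, ?_, ?_⟩
  · intro k hk
    rw [getD_eq_getElem' _ [] k (by simpa using hk)]
    simp
  · intro p q
    have : ((array.map (fun _ => (array.getD 0 []).map (fun _ => (0 : Int)))).getD p []).getD q 0 = 0 := by
      by_cases hp : p < array.length
      · rw [getD_eq_getElem' _ [] p (by simpa using hp)]
        simp
      · have hnone : (array.map (fun _ => (array.getD 0 []).map (fun _ => (0 : Int))))[p]? = none := by
          apply List.getElem?_eq_none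
          simpa using Nat.le_of_not_lt hp
        have hrow : (array.map (fun _ => (array.getD 0 []).map (fun _ => (0 : Int)))).getD p [] = ([] : List Int) := by
          rw [List.getD_eq_getElem?_getD, hnone]
          rfl
        rw [hrow]
        simp
    rw [this]
    simp

-- ===== VERDICT (by name: the statement is the Claim_ definition above) =====
theorem snake_sequence_spec : Claim_equal_snake_sequence := by
  intro array _ hpre
  unfold Spec_snake_sequence snake_sequence snake_sequence_alt
  rw [List.range_eq_range']
  exact outer_loop array hpre array.length 0 _ 0 (by omega) (dpok_init array)
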